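-- pv_equiv track=rewrite | github.com/schiess-dev-lab/EIDAT-V1 | EIDAT_App_Files/Application/eidat_manager_metadata.py | _find_program_title
-- ===== SOURCE A (Python) =====
-- from typing import Any, Optional
--
-- def _split_table_line(line: str) -> list[str]:
--     if "|" not in line:
--         return []
--     parts = [p.strip() for p in line.strip().strip("|").split("|")]
--     return [p for p in parts if p]
--
-- def _find_program_title(lines: list[str]) -> Optional[str]:
--     title_keys = {"title", "document title"}
--     program_keys = {"program", "program title", "program name"}
--     for line in lines:
--         parts = _split_table_line(line)
--         if parts and parts[0].lower() in title_keys: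
--             return parts[1].strip() if len(parts) > 1 else None
--     for line in lines:
--         parts = _split_table_line(line)
--         if parts and parts[0].lower() in program_keys:
--             return parts[1].strip() if len(parts) > 1 else None
--         line_l = line.lower().strip()
--         if not line_l.startswith("program"):
--             continue
--         if "program code" in line_l:
--             continue
--         if ":" in line:
--             return line.split(":", 1)[1].strip()
--         if "-" in line:
--             return line.split("-", 1)[1].strip()
--     return None
-- ===== SOURCE B (Python) =====
-- from typing import Any, Optional
--
-- def _cells(line: str) -> list[str]:
--     if "|" in line:
--         return [p for p in (q.strip() for q in line.strip().strip("|").split("|")) if p]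
--     return []
--
-- def _title_hit(parts: list[str]):
--     if parts and parts[0].lower() in ("title", "document title"):
--         return (parts[1].strip() if len(parts) > 1 else None,)
--     return None
--
-- def _prefix_program(line: str):
--     l = line.lower().strip()
--     if not l.startswith("program") or "program code" in l:
--         return None
--     for sep in (":", "-"):
--         if sep in line:
--             return (line.split(sep, 1)[1].strip(),)
--     return None
--
-- def _first_program(line: str, parts: list[str]):
--     if parts:
--         key = parts[0].lower()
--         if key in ("program", "program title", "program name"):
--             return (parts[1].strip() if len(parts) > 1 else None,)
--     return _prefix_program(line)
--
-- def _find_program_title(lines: list[str]) -> Optional[str]: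
--     prog = None
--     for line in lines:
--         parts = _cells(line)
--         t = _title_hit(parts)
--         if t:
--             return t[0]
--         if prog is None:
--             prog = _first_program(line, parts)
--     return prog[0] if prog else None
-- ===== Notes on version B (the rewrite author's own statement) =====
-- stated objective: alternative
-- what changed: Replaces A's two sequential full scans (title pass, then program pass) by a single pass that returns on the first title table-line and remembers the first program hit in an accumulator, returned only if no title line exists.
import Mathlib
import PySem

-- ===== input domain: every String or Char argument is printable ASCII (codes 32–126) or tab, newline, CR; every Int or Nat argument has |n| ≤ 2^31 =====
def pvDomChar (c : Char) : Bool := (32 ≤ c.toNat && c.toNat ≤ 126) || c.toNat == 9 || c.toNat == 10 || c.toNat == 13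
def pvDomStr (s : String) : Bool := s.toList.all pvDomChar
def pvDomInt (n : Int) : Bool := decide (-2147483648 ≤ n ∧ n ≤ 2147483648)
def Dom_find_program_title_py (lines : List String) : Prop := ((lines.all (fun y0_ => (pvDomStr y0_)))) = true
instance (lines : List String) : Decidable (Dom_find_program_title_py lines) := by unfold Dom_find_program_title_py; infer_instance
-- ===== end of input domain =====

-- B replaces A's two full scans by ONE pass that returns on the first title line and
-- remembers the first program hit (objective: alternative decomposition, same cost).

-- ===== PORT A =====
-- _split_table_line
def pySplitTableLine (line : String) : List String :=
  if !(PySem.Str.isIn "|" line) then []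
  else (((PySem.Str.split? (PySem.Str.stripChars (PySem.Str.strip line) "|") "|").getD []).map PySem.Str.strip).filter (fun p => !(p == ""))

-- first loop: return on first title-key table line
def pyPass1 : List String → Option (Option String)
  | [] => none
  | line :: rest =>
    match pySplitTableLine line with
    | p0 :: ps =>
      if PySem.Str.lower p0 == "title" || PySem.Str.lower p0 == "document title" then
        some (match ps with | [] => none | p1 :: _ => some (PySem.Str.strip p1))
      else pyPass1 rest
    | [] => pyPass1 rest

-- the non-table checks of the second loop's body (line_l = line.lower().strip())
def pyTail (line : String) : Option (Option String) :=
  let line_l := PySem.Str.strip (PySem.Str.lower line)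
  if !(PySem.Str.startswith line_l "program") then none
  else if PySem.Str.isIn "program code" line_l then none
  else if PySem.Str.isIn ":" line then
    some (some (PySem.Str.strip ((((PySem.Str.splitMax? line ":" 1).getD []).drop 1).headD "")))
  else if PySem.Str.isIn "-" line then
    some (some (PySem.Str.strip ((((PySem.Str.splitMax? line "-" 1).getD []).drop 1).headD "")))
  else none

-- the second loop's body: some r = early return r, none = continue
def pyStep2 (line : String) : Option (Option String) :=
  match pySplitTableLine line with
  | p0 :: ps =>
    if PySem.Str.lower p0 == "program" || PySem.Str.lower p0 == "program title" || PySem.Str.lower p0 == "program name" then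
      some (match ps with | [] => none | p1 :: _ => some (PySem.Str.strip p1))
    else pyTail line
  | [] => pyTail line

def pyPass2 : List String → Option (Option String)
  | [] => none
  | line :: rest =>
    match pyStep2 line with
    | some r => some r
    | none => pyPass2 rest

def find_program_title_py (lines : List String) : Option String :=
  match pyPass1 lines with
  | some r => r
  | none =>
    match pyPass2 lines with
    | some r => r
    | none => none

-- ===== PORT B =====
-- _cells
def altCells (line : String) : List String :=
  if PySem.Str.isIn "|" line then
    (((PySem.Str.split? (PySem.Str.stripChars (PySem.Str.strip line) "|") "|").getD []).map PySem.Str.strip).filter (fun p => !(p == ""))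
  else []

-- _title_hit
def altTitleHit (parts : List String) : Option (Option String) :=
  match parts with
  | p0 :: ps =>
    if PySem.Str.lower p0 == "title" || PySem.Str.lower p0 == "document title" then
      some (ps.head?.map PySem.Str.strip)
    else none
  | [] => none

-- the 'for sep in (":", "-")' loop of _first_program
def altSepSplit (line : String) : List String → Option (Option String)
  | [] => none
  | sep :: rest =>
    if PySem.Str.isIn sep line then
      some (some (PySem.Str.strip ((((PySem.Str.splitMax? line sep 1).getD []).drop 1).headD "")))
    else altSepSplit line rest

-- _prefix_program
def altPrefixProgram (line : String) : Option (Option String) :=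
  let l := PySem.Str.strip (PySem.Str.lower line)
  if !(PySem.Str.startswith l "program") || PySem.Str.isIn "program code" l then none
  else altSepSplit line [":", "-"]

-- _first_program
def altFirstProgram (line : String) (parts : List String) : Option (Option String) :=
  match parts with
  | p0 :: ps =>
    if PySem.Str.lower p0 == "program" || PySem.Str.lower p0 == "program title" || PySem.Str.lower p0 == "program name" then
      some (ps.head?.map PySem.Str.strip)
    else altPrefixProgram line
  | [] => altPrefixProgram line

-- the single pass, carrying the first program hit
def altGo (prog : Option (Option String)) : List String → Option String
  | [] => match prog with | some v => v | none => none
  | line :: rest =>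
    let parts := altCells line
    match altTitleHit parts with
    | some v => v
    | none =>
      altGo (match prog with | none => altFirstProgram line parts | some _ => prog) rest

def find_program_title_py_alt (lines : List String) : Option String :=
  altGo none lines

-- ===== PRECONDITION & SPEC =====
def Spec_find_program_title_py (lines : List String) (out : Option String) : Prop := out = find_program_title_py_alt lines
instance (lines : List String) (out : Option String) : Decidable (Spec_find_program_title_py lines out) := by unfold Spec_find_program_title_py; infer_instance

-- ===== CLAIM (what is proved, stated in full; the proofs are below) =====
def Claim_equal_find_program_title_py : Prop := ∀ (lines : List String), Dom_find_program_title_py lines → Spec_find_program_title_py lines (find_program_title_py lines)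

-- ===== LEMMAS AND PROOFS =====

theorem altCells_eq (line : String) : altCells line = pySplitTableLine line := by
  unfold altCells pySplitTableLine
  cases PySem.Str.isIn "|" line <;> simp

theorem tail_eq (line : String) : altPrefixProgram line = pyTail line := by
  unfold altPrefixProgram
  cases hs : PySem.Str.startswith (PySem.Str.strip (PySem.Str.lower line)) "program" <;>
    cases hc : PySem.Str.isIn "program code" (PySem.Str.strip (PySem.Str.lower line)) <;>
      simp at hs hc <;> simp [altSepSplit, pyTail, hs, hc]

theorem altFirstProgram_eq (line : String) :
    altFirstProgram line (pySplitTableLine line) = pyStep2 line := by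
  cases h : pySplitTableLine line with
  | nil =>
    simp only [altFirstProgram, pyStep2, h]
    exact tail_eq line
  | cons p0 ps =>
    simp only [altFirstProgram, pyStep2, h]
    by_cases hk : (PySem.Str.lower p0 == "program" || PySem.Str.lower p0 == "program title"
        || PySem.Str.lower p0 == "program name") = true
    · rw [if_pos hk, if_pos hk]
      cases ps <;> rfl
    · rw [if_neg hk, if_neg hk]
      exact tail_eq line

theorem titleHit_step (line : String) (rest : List String) :
    pyPass1 (line :: rest) =
      match altTitleHit (pySplitTableLine line) with
      | some v => some v
      | none => pyPass1 rest := by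
  unfold altTitleHit
  cases h : pySplitTableLine line with
  | nil => simp [pyPass1, h]
  | cons p0 ps =>
    by_cases hk : (PySem.Str.lower p0 == "title" || PySem.Str.lower p0 == "document title") = true
    · simp only [pyPass1, h, hk, if_true]
      cases ps <;> rfl
    · simp only [Bool.not_eq_true] at hk
      simp [pyPass1, h, hk]

theorem altGo_eq (lines : List String) : ∀ (prog : Option (Option String)),
    altGo prog lines =
      match pyPass1 lines with
      | some r => r
      | none =>
        match prog with
        | some v => v
        | none =>
          match pyPass2 lines with
          | some r => r
          | none => none := by
  induction lines with
  | nil => intro prog; cases prog <;> rfl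
  | cons line rest ih =>
    intro prog
    show (match altTitleHit (altCells line) with
      | some v => v
      | none => altGo (match prog with | none => altFirstProgram line (altCells line) | some _ => prog) rest) = _
    rw [altCells_eq, titleHit_step]
    have hpass2 : pyPass2 (line :: rest) =
        match pyStep2 line with
        | some r => some r
        | none => pyPass2 rest := rfl
    rw [hpass2]
    cases htitle : altTitleHit (pySplitTableLine line) with
    | some v => rfl
    | none =>
      rw [ih]
      cases prog with
      | some v => rfl
      | none =>
        rw [altFirstProgram_eq]
        cases pyStep2 line <;> rfl

-- ===== VERDICT (by name: the statement is the Claim_ definition above) =====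
theorem find_program_title_py_spec : Claim_equal_find_program_title_py := by
  intro lines _
  unfold Spec_find_program_title_py find_program_title_py find_program_title_py_alt
  rw [altGo_eq]
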